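-- pv_equiv track=rewrite | github.com/pypi-data/pypi-mirror-369 | packages/snapcheck-cli/snapcheck_cli-1.1.0.tar.gz/snapcheck_cli-1.1.0/plugins/terraform.py | estimate_cost_from_state
-- ===== SOURCE A (Python) =====
-- def estimate_cost_from_state(tfstate):
--     est = 0
--     for resource in tfstate.get("resources", []):
--         rtype = resource["type"]
--         if rtype == "aws_instance":
--             est += 20
--         elif rtype == "aws_s3_bucket":
--             est += 5
--         elif rtype == "aws_rds_instance":
--             est += 100
--     return f"${est}/mo (rough estimate based on resource types)"
-- ===== SOURCE B (Python) =====
-- def estimate_cost_from_state(tfstate):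
--     counts = {}
--     for resource in tfstate.get("resources", []):
--         rtype = resource["type"]
--         counts[rtype] = counts.get(rtype, 0) + 1
--     prices = {"aws_instance": 20, "aws_s3_bucket": 5, "aws_rds_instance": 100}
--     est = sum(price * counts.get(rtype, 0) for rtype, price in prices.items())
--     return f"${est}/mo (rough estimate based on resource types)"
-- ===== Notes on version B (the rewrite author's own statement) =====
-- stated objective: alternative
-- what changed: Replaces the inline if/elif accumulation with a two-phase count-then-multiply: one pass builds a dict of resource-type counts, then a pass over a price table sums price*count.
import Mathlib
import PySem

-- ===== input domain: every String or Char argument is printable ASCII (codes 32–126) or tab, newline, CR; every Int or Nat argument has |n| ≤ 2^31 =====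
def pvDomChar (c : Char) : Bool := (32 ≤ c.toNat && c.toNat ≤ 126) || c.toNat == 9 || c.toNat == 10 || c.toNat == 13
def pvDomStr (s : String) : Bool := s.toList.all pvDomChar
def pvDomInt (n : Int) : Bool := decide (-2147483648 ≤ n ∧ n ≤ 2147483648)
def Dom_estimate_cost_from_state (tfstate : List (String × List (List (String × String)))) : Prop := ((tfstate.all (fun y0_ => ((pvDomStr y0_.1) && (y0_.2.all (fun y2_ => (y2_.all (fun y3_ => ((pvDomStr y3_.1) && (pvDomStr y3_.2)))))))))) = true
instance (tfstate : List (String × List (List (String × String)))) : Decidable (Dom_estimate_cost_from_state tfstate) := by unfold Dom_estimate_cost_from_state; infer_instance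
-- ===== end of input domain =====

-- B replaces A's inline if/elif accumulation with count-then-multiply over a price table (objective: alternative decomposition).
-- ===== PORT A =====
def estimate_cost_from_state (tfstate : List (String × List (List (String × String)))) : String :=
  let est : Int := (PySem.Dict.getD (PySem.Dict.mk tfstate) "resources" []).foldl
    (fun est resource =>
      if PySem.Dict.getD (PySem.Dict.mk resource) "type" "" == "aws_instance" then est + 20
      else if PySem.Dict.getD (PySem.Dict.mk resource) "type" "" == "aws_s3_bucket" then est + 5
      else if PySem.Dict.getD (PySem.Dict.mk resource) "type" "" == "aws_rds_instance" then est + 100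
      else est) 0
  "$" ++ PySem.Int.toStr est ++ "/mo (rough estimate based on resource types)"

-- ===== PORT B =====
def estimate_cost_from_state_alt (tfstate : List (String × List (List (String × String)))) : String :=
  let counts : PySem.Dict String Int := (PySem.Dict.getD (PySem.Dict.mk tfstate) "resources" []).foldl
    (fun counts resource =>
      PySem.Dict.insert counts (PySem.Dict.getD (PySem.Dict.mk resource) "type" "")
        (PySem.Dict.getD counts (PySem.Dict.getD (PySem.Dict.mk resource) "type" "") 0 + 1)) PySem.Dict.empty
  let prices : PySem.Dict String Int := PySem.Dict.mk [("aws_instance", 20), ("aws_s3_bucket", 5), ("aws_rds_instance", 100)]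
  let est : Int := prices.items.foldl (fun s p => s + p.2 * PySem.Dict.getD counts p.1 0) 0
  "$" ++ PySem.Int.toStr est ++ "/mo (rough estimate based on resource types)"

-- ===== PRECONDITION & SPEC =====
-- Pre_ excludes exactly the inputs where some resource dict lacks the "type" key: there Python A (and B) raise KeyError.
def Pre_estimate_cost_from_state (tfstate : List (String × List (List (String × String)))) : Prop :=
  ∀ resource ∈ PySem.Dict.getD (PySem.Dict.mk tfstate) "resources" [], (PySem.Dict.contains (PySem.Dict.mk resource) "type") = true
instance (tfstate : List (String × List (List (String × String)))) : Decidable (Pre_estimate_cost_from_state tfstate) := by unfold Pre_estimate_cost_from_state; infer_instance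
def pvWitness_estimate_cost_from_state : (List (String × List (List (String × String)))) :=
  [("resources", [[("type", "aws_instance")], [("type", "other")]])]
def Spec_estimate_cost_from_state (tfstate : List (String × List (List (String × String)))) (out : String) : Prop := out = estimate_cost_from_state_alt tfstate
instance (tfstate : List (String × List (List (String × String)))) (out : String) : Decidable (Spec_estimate_cost_from_state tfstate out) := by unfold Spec_estimate_cost_from_state; infer_instance

-- ===== CLAIM (what is proved, stated in full; the proofs are below) =====
def Claim_equal_estimate_cost_from_state : Prop := ∀ (tfstate : List (String × List (List (String × String)))), Dom_estimate_cost_from_state tfstate → Pre_estimate_cost_from_state tfstate → Spec_estimate_cost_from_state tfstate (estimate_cost_from_state tfstate)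

-- ===== LEMMAS AND PROOFS =====

-- A's loop computes a linear combination of counts of the resource types.
theorem estACount (resources : List (List (String × String))) (e : Int) :
    resources.foldl
      (fun est resource =>
        if PySem.Dict.getD (PySem.Dict.mk resource) "type" "" == "aws_instance" then est + 20
        else if PySem.Dict.getD (PySem.Dict.mk resource) "type" "" == "aws_s3_bucket" then est + 5
        else if PySem.Dict.getD (PySem.Dict.mk resource) "type" "" == "aws_rds_instance" then est + 100
        else est) e
    = e + 20 * ((resources.map (fun r => PySem.Dict.getD (PySem.Dict.mk r) "type" "")).count "aws_instance")
        + 5 * ((resources.map (fun r => PySem.Dict.getD (PySem.Dict.mk r) "type" "")).count "aws_s3_bucket")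
        + 100 * ((resources.map (fun r => PySem.Dict.getD (PySem.Dict.mk r) "type" "")).count "aws_rds_instance") := by
  induction resources generalizing e with
  | nil => simp
  | cons r rs ih =>
    simp only [List.foldl_cons, List.map_cons, ih]
    by_cases h1 : PySem.Dict.getD (PySem.Dict.mk r) "type" "" = "aws_instance" <;>
      by_cases h2 : PySem.Dict.getD (PySem.Dict.mk r) "type" "" = "aws_s3_bucket" <;>
        by_cases h3 : PySem.Dict.getD (PySem.Dict.mk r) "type" "" = "aws_rds_instance" <;>
          simp [h1, h2, h3] <;> ring

-- B's counting loop is the counter of the same mapped list.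
theorem countsB_gen (resources : List (List (String × String))) (c : PySem.Dict String Int) (k : String) :
    PySem.Dict.getD
      (resources.foldl
        (fun counts resource =>
          PySem.Dict.insert counts (PySem.Dict.getD (PySem.Dict.mk resource) "type" "")
            (PySem.Dict.getD counts (PySem.Dict.getD (PySem.Dict.mk resource) "type" "") 0 + 1))
        c) k 0
    = PySem.Dict.getD c k 0 + ((resources.map (fun r => PySem.Dict.getD (PySem.Dict.mk r) "type" "")).count k : Int) := by
  induction resources generalizing c with
  | nil => simp
  | cons r rs ih =>
    simp only [List.foldl_cons, List.map_cons, ih, PySem.Dict.getD_insert, List.count_cons]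
    by_cases hk : k = PySem.Dict.getD (PySem.Dict.mk r) "type" ""
    · rw [if_pos hk, hk]
      simp only [beq_self_eq_true, if_true]
      push_cast
      ring
    · rw [if_neg hk]
      have hb : (PySem.Dict.getD (PySem.Dict.mk r) "type" "" == k) = false := by
        simp only [beq_eq_false_iff_ne, ne_eq]
        exact fun h => hk h.symm
      simp only [hb]
      push_cast
      ring

theorem countsB (resources : List (List (String × String))) (k : String) :
    PySem.Dict.getD
      (resources.foldl
        (fun counts resource =>
          PySem.Dict.insert counts (PySem.Dict.getD (PySem.Dict.mk resource) "type" "")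
            (PySem.Dict.getD counts (PySem.Dict.getD (PySem.Dict.mk resource) "type" "") 0 + 1))
        PySem.Dict.empty) k 0
    = ((resources.map (fun r => PySem.Dict.getD (PySem.Dict.mk r) "type" "")).count k : Int) := by
  rw [countsB_gen]
  simp [PySem.Dict.getD_empty]

-- ===== VERDICT (by name: the statement is the Claim_ definition above) =====
theorem estimate_cost_from_state_spec : Claim_equal_estimate_cost_from_state := by
  intro tfstate _ _
  unfold Spec_estimate_cost_from_state estimate_cost_from_state estimate_cost_from_state_alt
  simp only [estACount, countsB, List.foldl_cons, List.foldl_nil]
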